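-- pv_equiv track=rewrite | github.com/LeeDayday/programmers | src/30-142085.py | solution
-- ===== SOURCE A (Python) =====
-- from heapq import heappush, heappop
--
-- def solution(n, k, enemy):
--     e = len(enemy)
--     if k >= e:
--         return e
--
--     answer = 0
--     heap = []  # max heap (라운드 별 소모된 병사 저장. 기준: 병사 수)
--
--     for i in range(e):
--         n -= enemy[i]
--         heappush(heap, -enemy[i])  # 최대 힙에 추가
--         if n < 0: # 병사가 부족하면 무적권 사용
--             if k > 0:
--                 n += -heappop(heap)  # 가장 큰 적을 무적권으로 처리
--                 k -= 1
--             else: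
--                 return i  # 병사도 없고 무적권도 없으면 종료
--
--     return e
-- ===== SOURCE B (Python) =====
-- def solution(n, k, enemy):
--     e = len(enemy)
--     if k >= e:
--         return e
--     kk = max(k, 0)
--     for i in range(kk, e):
--         must_fight = sorted(enemy[:i+1])[:i+1-kk]
--         if sum(must_fight) > n:
--             return i
--     return e
-- ===== Notes on version B (the rewrite author's own statement) =====
-- stated objective: alternative
-- what changed: B keeps no heap and no token counter at all: for each round from k on it resorts the prefix of enemies seen so far and checks directly whether the sum of all but the k largest exceeds n, returning the first round where that per-round feasibility test fails, instead of A's running simulation with a negated max-heap and lazy token refunds.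
-- outside the precondition, e.g. on solution(0, 1, [2, -3, 5, -1]): A returns 2, B returns 4
import Mathlib
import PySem

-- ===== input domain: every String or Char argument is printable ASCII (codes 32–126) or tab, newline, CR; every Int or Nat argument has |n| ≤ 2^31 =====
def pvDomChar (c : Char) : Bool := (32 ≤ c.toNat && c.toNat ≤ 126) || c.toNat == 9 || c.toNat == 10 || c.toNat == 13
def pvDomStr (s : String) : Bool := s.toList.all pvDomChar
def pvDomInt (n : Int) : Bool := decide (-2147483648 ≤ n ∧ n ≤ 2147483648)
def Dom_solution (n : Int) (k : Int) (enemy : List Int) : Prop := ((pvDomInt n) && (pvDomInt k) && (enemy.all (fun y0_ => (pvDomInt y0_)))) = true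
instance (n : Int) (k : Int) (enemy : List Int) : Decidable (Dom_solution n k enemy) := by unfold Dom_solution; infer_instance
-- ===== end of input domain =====

-- B drops the heap and token counter entirely: for each round i ≥ k it re-sorts the prefix of
-- enemies seen so far and checks whether the sum of all but the k largest exceeds n, returning
-- the first round where that test fails. Objective: alternative (same values on nonnegative
-- enemy lists, a per-round feasibility test instead of A's lazy heap simulation; not faster).

-- ===== PORT A =====
-- Python's heapq min-heap is modelled as a list kept sorted ascending:
-- heappush = orderedInsert (same multiset), heappop = take the head (heappop returns the
-- minimum, which is the head of the ascending list); this is exact on the popped/returned values.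
def goA : Int → Int → List Int → Int → List Int → Option Int
  | _, _, _, _, [] => none                                  -- for-loop fell through
  | n, k, heap, i, x :: rest =>
    let n1 := n - x                                          -- n -= enemy[i]
    let heap1 := List.orderedInsert (· ≤ ·) (-x) heap        -- heappush(heap, -enemy[i])
    if n1 < 0 then
      if k > 0 then
        -- n += -heappop(heap); heappop returns the head (minimum); headD's default is never used
        goA (n1 + -(heap1.headD 0)) (k - 1) heap1.tail (i + 1) rest
      else some i                                            -- return i
    else goA n1 k heap1 (i + 1) rest

def solution (n : Int) (k : Int) (enemy : List Int) : Int :=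
  if k ≥ (enemy.length : Int) then (enemy.length : Int)
  else (goA n k [] 0 enemy).getD (enemy.length : Int)

-- ===== PORT B =====
-- the for-loop over range(kk, e); each iteration sorts the prefix enemy[:i+1] and sums the
-- smallest i+1-kk of it (sorted = PySem.List.sorted, slices = PySem.List.slice, exact)
def goB (n : Int) (kk : Int) (enemy : List Int) : List Int → Option Int
  | [] => none                                               -- loop fell through
  | i :: rest =>
      let pre := PySem.List.sorted (PySem.List.slice enemy none (some (i + 1))) (fun x => x) false
      let mustFight := PySem.List.slice pre none (some (i + 1 - kk))
      if mustFight.sum > n then some i else goB n kk enemy rest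

def solution_alt (n : Int) (k : Int) (enemy : List Int) : Int :=
  if k ≥ (enemy.length : Int) then (enemy.length : Int)
  else (goB n (max k 0) enemy (PySem.List.pyRange (max k 0) (enemy.length : Int) 1)).getD (enemy.length : Int)

-- ===== PRECONDITION & SPEC =====
-- Pre_ restricts to the task's natural domain of nonnegative enemy troop counts; on lists with a
-- negative entry A's refund-the-largest greedy and B's all-but-the-k-largest feasibility test
-- legitimately diverge (neither value is the specified one there). n and k stay unrestricted.
def Pre_solution (n : Int) (k : Int) (enemy : List Int) : Prop := ∀ y ∈ enemy, 0 ≤ y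
instance (n : Int) (k : Int) (enemy : List Int) : Decidable (Pre_solution n k enemy) := by unfold Pre_solution; infer_instance
def pvWitness_solution : Int × Int × List Int := (7, 1, [4, 2, 4, 8, 3])
def Spec_solution (n : Int) (k : Int) (enemy : List Int) (out : Int) : Prop := out = solution_alt n k enemy
instance (n : Int) (k : Int) (enemy : List Int) (out : Int) : Decidable (Spec_solution n k enemy out) := by unfold Spec_solution; infer_instance

-- ===== CLAIM (what is proved, stated in full; the proofs are below) =====
def Claim_equal_solution : Prop := ∀ (n : Int) (k : Int) (enemy : List Int), Dom_solution n k enemy → Pre_solution n k enemy → Spec_solution n k enemy (solution n k enemy)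

-- ===== LEMMAS AND PROOFS =====

-- proof-only intermediate program: the eager size-k min-heap simulation (kept = the enemies
-- currently covered by tokens, as a sorted list); A is coupled to goM, and goM to B's goB.
def goM : Int → Int → List Int → Int → List Int → Option Int
  | _, _, _, _, [] => none
  | n, k, kept, i, x :: rest =>
    let kept1 := List.orderedInsert (· ≤ ·) x kept
    if (kept1.length : Int) > k then
      let m := kept1.headD 0
      let n1 := n - m
      if n1 < 0 then some i else goM n1 k kept1.tail (i + 1) rest
    else goM n k kept1 (i + 1) rest

theorem sorted_perm_eq {l₁ l₂ : List Int} (h : List.Perm l₁ l₂) (s1 : l₁.Pairwise (· ≤ ·)) (s2 : l₂.Pairwise (· ≤ ·)) : l₁ = l₂ :=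
  List.Perm.eq_of_pairwise' s1 s2 h

theorem head_le_mem {c : Int} {cs : List Int} (h : List.Pairwise (α := Int) (· ≤ ·) (c :: cs)) : ∀ y ∈ c :: cs, c ≤ y := by
  intro y hy
  rcases List.mem_cons.mp hy with h1 | h2
  · exact h1 ▸ le_refl c
  · exact (List.pairwise_cons.mp h).1 y h2

theorem le_getLast_of_sorted : ∀ (l : List Int), List.Pairwise (α := Int) (· ≤ ·) l → (hne : l ≠ []) → ∀ y ∈ l, y ≤ l.getLast hne := by
  intro l
  induction l with
  | nil => intro _ h; exact absurd rfl h
  | cons a t ih =>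
    intro hp _ y hy
    rcases List.mem_cons.mp hy with h1 | h2
    · subst h1
      cases t with
      | nil => simp
      | cons b t' =>
        rw [List.getLast_cons (by simp)]
        calc y ≤ b := (List.pairwise_cons.mp hp).1 b (by simp)
          _ ≤ (b :: t').getLast (by simp) := ih (List.pairwise_cons.mp hp).2 (by simp) b (by simp)
    · have ht : t ≠ [] := by intro h; rw [h] at h2; simp at h2
      rw [List.getLast_cons ht]
      exact ih (List.pairwise_cons.mp hp).2 ht y h2

theorem oi_len (a : Int) (l : List Int) : (List.orderedInsert (· ≤ ·) a l).length = l.length + 1 :=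
  (List.perm_orderedInsert _ a l).length_eq

theorem oi_sum (a : Int) (l : List Int) : (List.orderedInsert (· ≤ ·) a l).sum = a + l.sum :=
  (List.perm_orderedInsert _ a l).sum_eq

theorem oi_mem {a y : Int} {l : List Int} (h : y ∈ List.orderedInsert (· ≤ ·) a l) : y = a ∨ y ∈ l := by
  have := (List.perm_orderedInsert (· ≤ ·) a l).mem_iff.mp h
  simpa using this

theorem oi_coe (a : Int) (l : List Int) : ((List.orderedInsert (· ≤ ·) a l : List Int) : Multiset Int) = a ::ₘ (l : Multiset Int) := by
  have := Multiset.coe_eq_coe.mpr (List.perm_orderedInsert (· ≤ ·) a l)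
  simpa using this

theorem oi_sorted {l : List Int} (h : l.Pairwise (· ≤ ·)) (a : Int) : (List.orderedInsert (· ≤ ·) a l).Pairwise (· ≤ ·) :=
  List.Pairwise.orderedInsert a l h

theorem oi_ne_nil (a : Int) (l : List Int) : List.orderedInsert (· ≤ ·) a l ≠ [] := by
  intro h
  have := oi_len a l
  rw [h] at this
  simp at this

-- popping the head of the sorted modelled heap returns the minimum, i.e. minus the maximum enemy
theorem heap_pop {heapA : List Int} {S : List Int}
    (hs : heapA.Pairwise (· ≤ ·))
    (hm : (heapA : Multiset Int) = ((S : List Int) : Multiset Int).map (fun y => -y))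
    (hne : heapA ≠ []) :
    ∃ c cs, heapA = c :: cs ∧ (-c) ∈ S ∧ (∀ y ∈ S, y ≤ -c) ∧ cs.Pairwise (· ≤ ·) ∧
      (c ::ₘ (cs : Multiset Int)) = ((S : List Int) : Multiset Int).map (fun y => -y) := by
  obtain ⟨c, cs, rfl⟩ := List.exists_cons_of_ne_nil hne
  refine ⟨c, cs, rfl, ?_, ?_, (List.pairwise_cons.mp hs).2, by simpa using hm⟩
  · have hc : c ∈ ((S : List Int) : Multiset Int).map (fun y => -y) := by
      rw [← hm]; simp
    simp only [Multiset.mem_map, Multiset.mem_coe] at hc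
    obtain ⟨y, hy, hyc⟩ := hc
    have : -c = y := by omega
    rw [this]; exact hy
  · intro y hy
    have : -y ∈ ((S : List Int) : Multiset Int).map (fun y => -y) := by
      simp only [Multiset.mem_map, Multiset.mem_coe]
      exact ⟨y, hy, rfl⟩
    rw [← hm] at this
    have := head_le_mem hs (-y) (by simpa using this)
    omega

theorem map_coe_perm {l₁ l₂ : List Int} (h : List.Perm l₁ l₂) :
    Multiset.map (fun y => -y) ((l₁ : List Int) : Multiset Int) = Multiset.map (fun y => -y) ((l₂ : List Int) : Multiset Int) :=
  congrArg _ (Multiset.coe_eq_coe.mpr h)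

theorem oi_cons_le {a b : Int} {t : List Int} (h : a ≤ b) :
    List.orderedInsert (· ≤ ·) a (b :: t) = a :: b :: t := by simp [List.orderedInsert, h]

theorem oi_cons_gt {a b : Int} {t : List Int} (h : ¬ a ≤ b) :
    List.orderedInsert (· ≤ ·) a (b :: t) = b :: List.orderedInsert (· ≤ ·) a t := by simp [List.orderedInsert, h]

theorem oi_head_cases {x nn : Int} {high : List Int}
    (h1 : nn < x) (h2 : ∀ hh ∈ high.head?, nn < hh) :
    ∀ hh ∈ (List.orderedInsert (· ≤ ·) x high).head?, nn < hh := by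
  intro hh hhm
  cases high with
  | nil =>
    have he : List.orderedInsert (· ≤ ·) x ([] : List Int) = [x] := rfl
    rw [he] at hhm; simp at hhm; omega
  | cons h0 hs0 =>
    by_cases hxh : x ≤ h0
    · rw [oi_cons_le hxh] at hhm; simp at hhm; omega
    · rw [oi_cons_gt hxh] at hhm; simp at hhm
      have := h2 h0 (by simp)
      omega

-- the COUPLED INVARIANT simulation for 0 < k:
-- A's state: nA = nB - low.sum, tokens left = k - high.length, heap = -(low ++ restL) sorted asc;
-- goM's state: kept = low ++ high (sorted), nB;
-- high = the enemies A has already refunded (the high.length largest seen so far),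
-- low = enemies goM still holds tokens for but A has not refunded, restL = enemies both have fought.
theorem coupled (k : Int) (hk : 0 < k) :
    ∀ (rest : List Int) (i nA nB : Int) (low high restL heapA : List Int),
    (∀ y ∈ rest, 0 ≤ y) →
    (∀ y ∈ low, 0 ≤ y) →
    (∀ y ∈ restL, 0 ≤ y) →
    List.Pairwise (· ≤ ·) (low ++ high) →
    List.Pairwise (· ≤ ·) heapA →
    ((heapA : Multiset Int) = (((low ++ restL) : List Int) : Multiset Int).map (fun y => -y)) →
    (∀ y ∈ restL, ∀ z ∈ low ++ high, y ≤ z) →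
    ((low.length : Int) + high.length ≤ k) →
    (((low.length : Int) + high.length < k) → restL = []) →
    (nA = nB - low.sum) →
    (∀ hh ∈ high.head?, nA < hh) →
    (nA < 0 → low = [] ∧ restL = []) →
    goA nA (k - high.length) heapA i rest = goM nB k (low ++ high) i rest := by
  intro rest
  induction rest with
  | nil => intro i nA nB low high restL heapA _ _ _ _ _ _ _ _ _ _ _ _; simp [goA, goM]
  | cons x rest ih =>
    intro i nA nB low high restL heapA hrest hlow0 hrestL0 hKBs hHs hHm hrb hlen hlt hnab hhigh h4
    have hx0 : 0 ≤ x := hrest x (by simp)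
    have hrest' : ∀ y ∈ rest, 0 ≤ y := fun y hy => hrest y (by simp [hy])
    have hlowS : low.Pairwise (· ≤ ·) := (List.pairwise_append.mp hKBs).1
    have hhighS : high.Pairwise (· ≤ ·) := (List.pairwise_append.mp hKBs).2.1
    have hlowhigh : ∀ a ∈ low, ∀ b ∈ high, a ≤ b := (List.pairwise_append.mp hKBs).2.2
    have hheap1S : (List.orderedInsert (· ≤ ·) (-x) heapA).Pairwise (· ≤ ·) := oi_sorted hHs (-x)
    have hheap1M : ((List.orderedInsert (· ≤ ·) (-x) heapA : List Int) : Multiset Int)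
        = (((x :: (low ++ restL)) : List Int) : Multiset Int).map (fun y => -y) := by
      rw [oi_coe, hHm]; simp
    simp only [goA, goM]
    by_cases hfull : (low.length : Int) + high.length < k
    · -- CASE 1: goM's heap is not yet full; goM keeps x without fighting anyone
      have hrnil := hlt hfull
      subst hrnil
      have hg : ¬ (((List.orderedInsert (· ≤ ·) x (low ++ high)).length : Int) > k) := by
        rw [oi_len]; push_cast [List.length_append]; omega
      rw [if_neg hg]
      by_cases hdef : nA - x < 0
      · -- CASE 1b: deficit: A refunds its max
        have hkA : k - (high.length : Int) > 0 := by
          have h0 : (0:Int) ≤ (low.length : Int) := Int.natCast_nonneg _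
          omega
        rw [if_pos hdef, if_pos hkA]
        obtain ⟨c, cs, hc, hcmem, hcmax, hcsS, hcsM⟩ :=
          heap_pop (S := x :: (low ++ [])) hheap1S hheap1M (oi_ne_nil _ _)
        rw [hc]
        simp only [List.headD, List.tail]
        by_cases hxl : ∀ z ∈ low, z ≤ x
        · -- the refunded max is x itself
          have hcx : -c = x := by
            have h1 : -c ≤ x := by
              rcases List.mem_cons.mp hcmem with h | h
              · omega
              · simp only [List.append_nil] at h
                exact hxl _ h
            have h2 : x ≤ -c := hcmax x (by simp)
            omega
          have e1 : nA - x + -c = nA := by omega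
          rw [e1]
          have e2 : k - (high.length : Int) - 1 = k - ((List.orderedInsert (· ≤ ·) x high).length : Int) := by
            rw [oi_len]; push_cast; ring
          rw [e2]
          have hRS : (low ++ List.orderedInsert (· ≤ ·) x high).Pairwise (· ≤ ·) := by
            rw [List.pairwise_append]
            refine ⟨hlowS, oi_sorted hhighS x, ?_⟩
            intro a ha b hb
            rcases oi_mem hb with heq | hb'
            · rw [heq]; exact hxl a ha
            · exact hlowhigh a ha b hb'
          have hkept : List.orderedInsert (· ≤ ·) x (low ++ high) = low ++ List.orderedInsert (· ≤ ·) x high := by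
            apply sorted_perm_eq ?_ (oi_sorted hKBs x) hRS
            refine (List.perm_orderedInsert _ x _).trans ?_
            refine (List.perm_middle (a := x) (l₁ := low) (l₂ := high)).symm.trans ?_
            exact List.Perm.append_left low (List.perm_orderedInsert _ x high).symm
          rw [hkept]
          apply ih (i+1) nA nB low (List.orderedInsert (· ≤ ·) x high) [] cs hrest' hlow0 (by simp)
          · exact hRS
          · exact hcsS
          · have hcons : (c ::ₘ (cs : Multiset Int)) = c ::ₘ (((low ++ ([]:List Int)) : List Int) : Multiset Int).map (fun y => -y) := by
              rw [hcsM]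
              have hstep : (((x :: (low ++ ([]:List Int))) : List Int) : Multiset Int).map (fun y => -y)
                  = (-x) ::ₘ (((low ++ ([]:List Int)) : List Int) : Multiset Int).map (fun y => -y) := by
                simp
              rw [hstep]
              have hcv : c = -x := by omega
              rw [hcv]
            exact (Multiset.cons_inj_right c).mp hcons
          · intro y hy; simp at hy
          · rw [oi_len]; push_cast; omega
          · intro _; rfl
          · exact hnab
          · exact oi_head_cases (by omega) hhigh
          · intro hneg
            exact ⟨(h4 hneg).1, rfl⟩
        · -- the refunded max is the largest element of low
          push_neg at hxl
          obtain ⟨w, hw, hwx⟩ := hxl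
          have hlne : low ≠ [] := by intro h; rw [h] at hw; simp at hw
          set L := low.getLast hlne with hLdef
          set D := low.dropLast with hDdef
          have hDL : D ++ [L] = low := List.dropLast_append_getLast hlne
          have hwL : w ≤ L := le_getLast_of_sorted low hlowS hlne w hw
          have hxL : x < L := lt_of_lt_of_le hwx hwL
          have hLmem : L ∈ low := List.getLast_mem hlne
          have hDsub : ∀ y ∈ D, y ∈ low := fun y hy => by
            rw [← hDL]; exact List.mem_append_left _ hy
          have hDS : D.Pairwise (· ≤ ·) := hlowS.sublist (List.dropLast_sublist low)
          have hDle : ∀ y ∈ D, y ≤ L := fun y hy => le_getLast_of_sorted low hlowS hlne y (hDsub y hy)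
          have hcL : -c = L := by
            have h1 : -c ≤ L := by
              rcases List.mem_cons.mp hcmem with h | h
              · omega
              · simp only [List.append_nil] at h
                exact le_getLast_of_sorted low hlowS hlne _ h
            have h2 : L ≤ -c := hcmax L (by simp [hLmem])
            omega
          have e1 : nA - x + -c = nA - x + L := by omega
          rw [e1]
          have e2 : k - (high.length : Int) - 1 = k - (((L :: high) : List Int).length : Int) := by
            simp only [List.length_cons]; push_cast; ring
          rw [e2]
          have hRS : ((List.orderedInsert (· ≤ ·) x D) ++ (L :: high)).Pairwise (· ≤ ·) := by
            rw [List.pairwise_append]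
            refine ⟨oi_sorted hDS x, List.pairwise_cons.mpr ⟨fun b hb => hlowhigh L hLmem b hb, hhighS⟩, ?_⟩
            intro a ha b hb
            have haL : a ≤ L := by
              rcases oi_mem ha with heq | ha'
              · omega
              · exact hDle a ha'
            rcases List.mem_cons.mp hb with heq | hb'
            · omega
            · have := hlowhigh L hLmem b hb'
              omega
          have hkept : List.orderedInsert (· ≤ ·) x (low ++ high)
              = (List.orderedInsert (· ≤ ·) x D) ++ (L :: high) := by
            apply sorted_perm_eq ?_ (oi_sorted hKBs x) hRS
            refine (List.perm_orderedInsert _ x _).trans ?_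
            have hsplit : x :: (low ++ high) = x :: (D ++ (L :: high)) := by
              rw [← hDL]; simp
            rw [hsplit]
            have h1 : x :: (D ++ (L :: high)) = (x :: D) ++ (L :: high) := by simp
            rw [h1]
            exact List.Perm.append_right _ (List.perm_orderedInsert _ x D).symm
          rw [hkept]
          apply ih (i+1) (nA - x + L) nB (List.orderedInsert (· ≤ ·) x D) (L :: high) [] cs hrest'
          · intro y hy
            rcases oi_mem hy with heq | hy'
            · omega
            · exact hlow0 y (hDsub y hy')
          · simp
          · exact hRS
          · exact hcsS
          · have hperm : List.Perm (x :: (low ++ ([]:List Int))) (L :: ((List.orderedInsert (· ≤ ·) x D) ++ ([]:List Int))) := by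
              simp only [List.append_nil]
              have h1 : List.Perm low (L :: D) := by
                rw [← hDL]
                exact List.perm_append_comm
              refine ((List.Perm.cons x h1).trans (List.Perm.swap L x D)).trans ?_
              exact List.Perm.cons L (List.perm_orderedInsert _ x D).symm
            have hcons : (c ::ₘ (cs : Multiset Int)) = c ::ₘ ((((List.orderedInsert (· ≤ ·) x D) ++ ([]:List Int)) : List Int) : Multiset Int).map (fun y => -y) := by
              rw [hcsM, map_coe_perm hperm]
              have hstep : (((L :: ((List.orderedInsert (· ≤ ·) x D) ++ ([]:List Int))) : List Int) : Multiset Int).map (fun y => -y)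
                  = (-L) ::ₘ ((((List.orderedInsert (· ≤ ·) x D) ++ ([]:List Int)) : List Int) : Multiset Int).map (fun y => -y) := by
                simp
              rw [hstep]
              have hcv : c = -L := by omega
              rw [hcv]
            exact (Multiset.cons_inj_right c).mp hcons
          · intro y hy; simp at hy
          · have hDlen : D.length + 1 = low.length := by
              rw [← hDL]; simp
            rw [oi_len]
            simp only [List.length_cons]
            push_cast
            omega
          · intro _; rfl
          · have hsum : D.sum + L = low.sum := by rw [← hDL]; simp
            rw [oi_sum]
            omega
          · intro hh hhm
            simp at hhm
            omega
          · intro hneg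
            exfalso
            have hnA0 : 0 ≤ nA := by
              by_contra hn
              exact hlne (h4 (by omega)).1
            omega
      · -- CASE 1a: no deficit, goM's heap not full: both just keep going
        rw [if_neg hdef]
        have hxhigh : ∀ b ∈ high, x ≤ b := by
          intro b hb
          obtain ⟨h0, hs0, hhs⟩ := List.exists_cons_of_ne_nil (l := high) (by rintro rfl; simp at hb)
          have h1 : nA < h0 := by
            apply hhigh
            rw [hhs]; simp
          have h2 : h0 ≤ b := head_le_mem (hhs ▸ hhighS) b (hhs ▸ hb)
          omega
        have hRS : ((List.orderedInsert (· ≤ ·) x low) ++ high).Pairwise (· ≤ ·) := by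
          rw [List.pairwise_append]
          refine ⟨oi_sorted hlowS x, hhighS, ?_⟩
          intro a ha b hb
          rcases oi_mem ha with heq | ha'
          · have := hxhigh b hb; omega
          · exact hlowhigh a ha' b hb
        have hkept : List.orderedInsert (· ≤ ·) x (low ++ high)
            = (List.orderedInsert (· ≤ ·) x low) ++ high := by
          apply sorted_perm_eq ?_ (oi_sorted hKBs x) hRS
          refine (List.perm_orderedInsert _ x _).trans ?_
          have h1 : x :: (low ++ high) = (x :: low) ++ high := by simp
          rw [h1]
          exact List.Perm.append_right _ (List.perm_orderedInsert _ x low).symm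
        rw [hkept]
        apply ih (i+1) (nA - x) nB (List.orderedInsert (· ≤ ·) x low) high [] (List.orderedInsert (· ≤ ·) (-x) heapA) hrest'
        · intro y hy
          rcases oi_mem hy with heq | hy'
          · omega
          · exact hlow0 y hy'
        · simp
        · exact hRS
        · exact hheap1S
        · rw [hheap1M]
          refine map_coe_perm ?_
          simp only [List.append_nil]
          exact (List.perm_orderedInsert _ x low).symm
        · intro y hy; simp at hy
        · rw [oi_len]; push_cast; omega
        · intro _; rfl
        · rw [oi_sum]; omega
        · intro hh hhm
          have := hhigh hh hhm
          omega
        · intro hneg; exact absurd hneg hdef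
    · -- CASE 2: goM's heap is full: goM pops and fights the smallest tokened enemy
      have hbk : (low.length : Int) + high.length = k := le_antisymm hlen (not_lt.mp hfull)
      have hg : (((List.orderedInsert (· ≤ ·) x (low ++ high)).length : Int) > k) := by
        rw [oi_len]; push_cast [List.length_append]; omega
      rw [if_pos hg]
      by_cases hlownil : low = []
      · -- all k tokens already spent by A (high holds them all)
        subst hlownil
        have hhne : high ≠ [] := by
          intro h
          rw [h] at hbk
          simp at hbk
          omega
        obtain ⟨h0, hs0, hhs⟩ := List.exists_cons_of_ne_nil hhne
        subst hhs
        have hnAh : nA < h0 := hhigh h0 (by simp)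
        have hkA0 : ¬ (k - (((h0 :: hs0) : List Int).length : Int) > 0) := by
          simp only [List.length_nil, List.length_cons] at hbk ⊢
          push_cast at hbk ⊢
          omega
        have hnanb : nA = nB := by simpa using hnab
        by_cases hxh : x ≤ h0
        · have hkept : List.orderedInsert (· ≤ ·) x (([] : List Int) ++ h0 :: hs0) = x :: (h0 :: hs0) := by
            simp only [List.nil_append]
            exact oi_cons_le hxh
          rw [hkept]
          simp only [List.headD, List.tail]
          by_cases hdef : nA - x < 0
          · rw [if_pos hdef, if_neg hkA0, if_pos (by omega : nB - x < 0)]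
          · rw [if_neg hdef, if_neg (by omega : ¬ nB - x < 0)]
            apply ih (i+1) (nA - x) (nB - x) [] (h0 :: hs0) (x :: restL) (List.orderedInsert (· ≤ ·) (-x) heapA) hrest' (by simp)
            · intro y hy
              rcases List.mem_cons.mp hy with heq | hy'
              · omega
              · exact hrestL0 y hy'
            · exact hKBs
            · exact hheap1S
            · rw [hheap1M]
              rfl
            · intro y hy z hz
              rcases List.mem_cons.mp hy with heq | hy'
              · have h2 := head_le_mem hhighS z (by simpa using hz)
                omega
              · exact hrb y hy' z hz
            · exact hlen
            · intro hcon
              exfalso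
              simp only [List.length_nil, List.length_cons] at hbk hcon
              push_cast at hbk hcon
              omega
            · simp only [List.sum_nil]
              omega
            · intro hh hhm
              simp at hhm
              omega
            · intro hneg; exact absurd hneg hdef
        · have hh0x : h0 < x := not_le.mp hxh
          have hkept : List.orderedInsert (· ≤ ·) x (([] : List Int) ++ h0 :: hs0)
              = h0 :: List.orderedInsert (· ≤ ·) x hs0 := by
            simp only [List.nil_append]
            exact oi_cons_gt hxh
          rw [hkept]
          simp only [List.headD, List.tail]
          rw [if_pos (by omega : nA - x < 0), if_neg hkA0, if_pos (by omega : nB - h0 < 0)]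
      · -- low is nonempty: A still has tokens
        obtain ⟨hl, lt, hlle⟩ := List.exists_cons_of_ne_nil hlownil
        subst hlle
        have hkA : k - (high.length : Int) > 0 := by
          simp only [List.length_cons] at hbk
          push_cast at hbk ⊢
          omega
        have hnA0 : 0 ≤ nA := by
          by_contra hn
          have := (h4 (by omega)).1
          simp at this
        have hhl_low : ∀ y ∈ hl :: lt, hl ≤ y := head_le_mem hlowS
        have hlt0 : ∀ y ∈ lt, 0 ≤ y := fun y hy => hlow0 y (by simp [hy])
        have hl0 : 0 ≤ hl := hlow0 hl (by simp)
        have hltsum0 : 0 ≤ lt.sum := List.sum_nonneg hlt0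
        have hltS : lt.Pairwise (· ≤ ·) := (List.pairwise_cons.mp hlowS).2
        have htailS : (lt ++ high).Pairwise (· ≤ ·) := by
          have h1 : ((hl :: lt) ++ high).Pairwise (· ≤ ·) := hKBs
          rw [List.cons_append] at h1
          exact (List.pairwise_cons.mp h1).2
        have hhl_KB : ∀ z ∈ (hl :: lt) ++ high, hl ≤ z := by
          intro z hz
          rcases List.mem_append.mp hz with h' | h'
          · exact hhl_low z h'
          · exact hlowhigh hl (by simp) z h'
        by_cases hxh : x ≤ hl
        · -- x itself is the minimum: goM pops and fights x
          have hkept : List.orderedInsert (· ≤ ·) x ((hl :: lt) ++ high) = x :: ((hl :: lt) ++ high) := by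
            rw [List.cons_append]
            exact oi_cons_le hxh
          rw [hkept]
          simp only [List.headD, List.tail]
          by_cases hdef : nA - x < 0
          · rw [if_pos hdef, if_pos hkA]
            have hBok : ¬ (nB - x < 0) := by
              simp only [List.sum_cons] at hnab
              omega
            rw [if_neg hBok]
            obtain ⟨c, cs, hc, hcmem, hcmax, hcsS, hcsM⟩ :=
              heap_pop (S := x :: ((hl :: lt) ++ restL)) hheap1S hheap1M (oi_ne_nil _ _)
            rw [hc]
            simp only [List.headD, List.tail]
            have hlne : (hl :: lt) ≠ [] := by simp
            set L := (hl :: lt).getLast hlne with hLdef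
            set D := (hl :: lt).dropLast with hDdef
            have hDL : D ++ [L] = hl :: lt := List.dropLast_append_getLast hlne
            have hLmem : L ∈ hl :: lt := List.getLast_mem hlne
            have hLlow : ∀ y ∈ hl :: lt, y ≤ L := le_getLast_of_sorted _ hlowS hlne
            have hDsub : ∀ y ∈ D, y ∈ hl :: lt := fun y hy => by
              rw [← hDL]; exact List.mem_append_left _ hy
            have hDS : D.Pairwise (· ≤ ·) := hlowS.sublist (List.dropLast_sublist _)
            have hcL : -c = L := by
              have h1 : -c ≤ L := by
                rcases List.mem_cons.mp hcmem with h | h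
                · have := hLlow hl (by simp)
                  omega
                · rcases List.mem_append.mp h with h' | h'
                  · exact hLlow _ h'
                  · exact hrb _ h' L (List.mem_append_left _ hLmem)
              have h2 : L ≤ -c := hcmax L (by rcases List.mem_cons.mp hLmem with h | h <;> simp [h])
              omega
            have e1 : nA - x + -c = nA - x + L := by omega
            rw [e1]
            have e2 : k - (high.length : Int) - 1 = k - (((L :: high) : List Int).length : Int) := by
              simp only [List.length_cons]; push_cast; ring
            rw [e2]
            have hKB' : (hl :: lt) ++ high = D ++ (L :: high) := by
              rw [← hDL]; simp
            rw [hKB']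
            apply ih (i+1) (nA - x + L) (nB - x) D (L :: high) (x :: restL) cs hrest'
            · intro y hy; exact hlow0 y (hDsub y hy)
            · intro y hy
              rcases List.mem_cons.mp hy with heq | hy'
              · omega
              · exact hrestL0 y hy'
            · rw [← hKB']; exact hKBs
            · exact hcsS
            · have hperm : List.Perm (x :: ((hl :: lt) ++ restL)) (L :: (D ++ (x :: restL))) := by
                have h1 : List.Perm ((hl :: lt) ++ restL) (L :: (D ++ restL)) := by
                  have h2 : (hl :: lt) ++ restL = D ++ (L :: restL) := by
                    rw [← hDL]; simp
                  rw [h2]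
                  exact List.perm_middle
                refine ((List.Perm.cons x h1).trans (List.Perm.swap L x _)).trans ?_
                exact List.Perm.cons L List.perm_middle.symm
              have hcons : (c ::ₘ (cs : Multiset Int)) = c ::ₘ (((D ++ (x :: restL)) : List Int) : Multiset Int).map (fun y => -y) := by
                rw [hcsM, map_coe_perm hperm]
                have hstep : (((L :: (D ++ (x :: restL))) : List Int) : Multiset Int).map (fun y => -y)
                    = (-L) ::ₘ (((D ++ (x :: restL)) : List Int) : Multiset Int).map (fun y => -y) := by
                  simp
                rw [hstep]
                have hcv : c = -L := by omega
                rw [hcv]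
              exact (Multiset.cons_inj_right c).mp hcons
            · intro y hy z hz
              rcases List.mem_cons.mp hy with heq | hy'
              · have h2 := hhl_KB z (hKB'.symm ▸ hz)
                omega
              · exact hrb y hy' z (hKB'.symm ▸ hz)
            · have hDlen : D.length + 1 = (hl :: lt).length := by
                rw [← hDL]; simp
              simp only [List.length_cons] at hbk hDlen ⊢
              push_cast at hbk ⊢
              omega
            · intro hcon
              exfalso
              have hDlen : D.length + 1 = (hl :: lt).length := by
                rw [← hDL]; simp
              simp only [List.length_cons] at hbk hDlen hcon
              push_cast at hbk hcon
              omega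
            · have hsum : D.sum + L = (hl :: lt).sum := by
                rw [← hDL]; simp
              simp only [List.sum_cons] at hnab hsum ⊢
              omega
            · intro hh hhm
              simp at hhm
              omega
            · intro hneg
              exfalso
              have hxL : x ≤ L := le_trans hxh (hLlow hl (by simp))
              omega
          · rw [if_neg hdef]
            have hBok : ¬ (nB - x < 0) := by
              simp only [List.sum_cons] at hnab
              omega
            rw [if_neg hBok]
            apply ih (i+1) (nA - x) (nB - x) (hl :: lt) high (x :: restL) (List.orderedInsert (· ≤ ·) (-x) heapA) hrest' hlow0
            · intro y hy
              rcases List.mem_cons.mp hy with heq | hy'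
              · omega
              · exact hrestL0 y hy'
            · exact hKBs
            · exact hheap1S
            · rw [hheap1M]
              refine map_coe_perm ?_
              exact List.perm_middle.symm
            · intro y hy z hz
              rcases List.mem_cons.mp hy with heq | hy'
              · have := hhl_KB z hz
                omega
              · exact hrb y hy' z hz
            · exact hlen
            · intro hcon; exact absurd hcon hfull
            · simp only [List.sum_cons] at hnab ⊢
              omega
            · intro hh hhm
              have := hhigh hh hhm
              omega
            · intro hneg; exact absurd hneg hdef
        · -- hl < x: goM pops and fights hl
          have hhlx : hl < x := not_le.mp hxh
          have hkept : List.orderedInsert (· ≤ ·) x ((hl :: lt) ++ high)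
              = hl :: List.orderedInsert (· ≤ ·) x (lt ++ high) := by
            rw [List.cons_append]
            exact oi_cons_gt hxh
          rw [hkept]
          simp only [List.headD, List.tail]
          have hBok : ¬ (nB - hl < 0) := by
            simp only [List.sum_cons] at hnab
            omega
          rw [if_neg hBok]
          by_cases hdef : nA - x < 0
          · rw [if_pos hdef, if_pos hkA]
            obtain ⟨c, cs, hc, hcmem, hcmax, hcsS, hcsM⟩ :=
              heap_pop (S := x :: ((hl :: lt) ++ restL)) hheap1S hheap1M (oi_ne_nil _ _)
            rw [hc]
            simp only [List.headD, List.tail]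
            by_cases hxL : ∀ z ∈ hl :: lt, z ≤ x
            · -- the refunded max is x itself
              have hcx : -c = x := by
                have h1 : -c ≤ x := by
                  rcases List.mem_cons.mp hcmem with h | h
                  · omega
                  · rcases List.mem_append.mp h with h' | h'
                    · exact hxL _ h'
                    · have := hrb _ h' hl (by simp)
                      omega
                have h2 : x ≤ -c := hcmax x (by simp)
                omega
              have e1 : nA - x + -c = nA := by omega
              rw [e1]
              have e2 : k - (high.length : Int) - 1 = k - ((List.orderedInsert (· ≤ ·) x high).length : Int) := by
                rw [oi_len]; push_cast; ring
              rw [e2]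
              have hltx : ∀ z ∈ lt, z ≤ x := fun z hz => hxL z (by simp [hz])
              have hRS : (lt ++ List.orderedInsert (· ≤ ·) x high).Pairwise (· ≤ ·) := by
                rw [List.pairwise_append]
                refine ⟨hltS, oi_sorted hhighS x, ?_⟩
                intro a ha b hb
                rcases oi_mem hb with heq | hb'
                · have := hltx a ha; omega
                · exact hlowhigh a (by simp [ha]) b hb'
              have hkept2 : List.orderedInsert (· ≤ ·) x (lt ++ high) = lt ++ List.orderedInsert (· ≤ ·) x high := by
                apply sorted_perm_eq ?_ (oi_sorted htailS x) hRS
                refine (List.perm_orderedInsert _ x _).trans ?_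
                refine (List.perm_middle (a := x) (l₁ := lt) (l₂ := high)).symm.trans ?_
                exact List.Perm.append_left lt (List.perm_orderedInsert _ x high).symm
              rw [hkept2]
              apply ih (i+1) nA (nB - hl) lt (List.orderedInsert (· ≤ ·) x high) (hl :: restL) cs hrest' hlt0
              · intro y hy
                rcases List.mem_cons.mp hy with heq | hy'
                · omega
                · exact hrestL0 y hy'
              · exact hRS
              · exact hcsS
              · have hperm : List.Perm (x :: ((hl :: lt) ++ restL)) (x :: (lt ++ (hl :: restL))) := by
                  refine List.Perm.cons x ?_
                  have h1 : (hl :: lt) ++ restL = hl :: (lt ++ restL) := by simp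
                  rw [h1]
                  exact List.perm_middle.symm
                have hcons : (c ::ₘ (cs : Multiset Int)) = c ::ₘ (((lt ++ (hl :: restL)) : List Int) : Multiset Int).map (fun y => -y) := by
                  rw [hcsM, map_coe_perm hperm]
                  have hstep : (((x :: (lt ++ (hl :: restL))) : List Int) : Multiset Int).map (fun y => -y)
                      = (-x) ::ₘ (((lt ++ (hl :: restL)) : List Int) : Multiset Int).map (fun y => -y) := by
                    simp
                  rw [hstep]
                  have hcv : c = -x := by omega
                  rw [hcv]
                exact (Multiset.cons_inj_right c).mp hcons
              · intro y hy zz hzz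
                rcases List.mem_cons.mp hy with heq | hy'
                · rcases List.mem_append.mp hzz with h' | h'
                  · have := hhl_low zz (by simp [h']); omega
                  · rcases oi_mem h' with heq2 | h''
                    · omega
                    · have := hlowhigh hl (by simp) zz h''
                      omega
                · rcases List.mem_append.mp hzz with h' | h'
                  · exact hrb y hy' zz (List.mem_append_left _ (by simp [h']))
                  · rcases oi_mem h' with heq2 | h''
                    · have := hrb y hy' hl (by simp)
                      omega
                    · exact hrb y hy' zz (List.mem_append_right _ h'')
              · rw [oi_len]
                simp only [List.length_cons] at hbk
                push_cast at hbk ⊢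
                omega
              · intro hcon
                exfalso
                rw [oi_len] at hcon
                simp only [List.length_cons] at hbk
                push_cast at hbk hcon
                omega
              · simp only [List.sum_cons] at hnab ⊢
                omega
              · exact oi_head_cases (by omega) hhigh
              · intro hneg; exact absurd hneg (by omega)
            · -- the refunded max is the largest element of low
              push_neg at hxL
              obtain ⟨w, hw, hwx⟩ := hxL
              have hltne : lt ≠ [] := by
                rintro rfl
                rcases List.mem_cons.mp hw with heq | h
                · omega
                · simp at h
              have hlne : (hl :: lt) ≠ [] := by simp
              set L := (hl :: lt).getLast hlne with hLdef
              have hLlt : L = lt.getLast hltne := List.getLast_cons hltne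
              have hLmem : L ∈ hl :: lt := List.getLast_mem hlne
              have hLlow : ∀ y ∈ hl :: lt, y ≤ L := le_getLast_of_sorted _ hlowS hlne
              have hwL : w ≤ L := hLlow w hw
              have hxLlt : x < L := lt_of_lt_of_le hwx hwL
              set E := lt.dropLast with hEdef
              have hEL : E ++ [L] = lt := by
                rw [hLlt]
                exact List.dropLast_append_getLast hltne
              have hEsub : ∀ y ∈ E, y ∈ lt := fun y hy => by
                rw [← hEL]; exact List.mem_append_left _ hy
              have hES : E.Pairwise (· ≤ ·) := hltS.sublist (List.dropLast_sublist _)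
              have hEleL : ∀ y ∈ E, y ≤ L := fun y hy => hLlow y (by simp [hEsub y hy])
              have hcL : -c = L := by
                have h1 : -c ≤ L := by
                  rcases List.mem_cons.mp hcmem with h | h
                  · omega
                  · rcases List.mem_append.mp h with h' | h'
                    · exact hLlow _ h'
                    · exact hrb _ h' L (List.mem_append_left _ hLmem)
                have h2 : L ≤ -c := hcmax L (by rcases List.mem_cons.mp hLmem with h | h <;> simp [h])
                omega
              have e1 : nA - x + -c = nA - x + L := by omega
              rw [e1]
              have e2 : k - (high.length : Int) - 1 = k - (((L :: high) : List Int).length : Int) := by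
                simp only [List.length_cons]; push_cast; ring
              rw [e2]
              have hRS : ((List.orderedInsert (· ≤ ·) x E) ++ (L :: high)).Pairwise (· ≤ ·) := by
                rw [List.pairwise_append]
                refine ⟨oi_sorted hES x, List.pairwise_cons.mpr ⟨fun b hb => hlowhigh L hLmem b hb, hhighS⟩, ?_⟩
                intro a ha b hb
                have haL : a ≤ L := by
                  rcases oi_mem ha with heq | ha'
                  · omega
                  · exact hEleL a ha'
                rcases List.mem_cons.mp hb with heq | hb'
                · omega
                · have := hlowhigh L hLmem b hb'
                  omega
              have hkept2 : List.orderedInsert (· ≤ ·) x (lt ++ high)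
                  = (List.orderedInsert (· ≤ ·) x E) ++ (L :: high) := by
                apply sorted_perm_eq ?_ (oi_sorted htailS x) hRS
                refine (List.perm_orderedInsert _ x _).trans ?_
                have h1 : lt ++ high = E ++ (L :: high) := by rw [← hEL]; simp
                rw [h1]
                have h2 : x :: (E ++ (L :: high)) = (x :: E) ++ (L :: high) := by simp
                rw [h2]
                exact List.Perm.append_right _ (List.perm_orderedInsert _ x E).symm
              rw [hkept2]
              apply ih (i+1) (nA - x + L) (nB - hl) (List.orderedInsert (· ≤ ·) x E) (L :: high) (hl :: restL) cs hrest'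
              · intro y hy
                rcases oi_mem hy with heq | hy'
                · omega
                · exact hlt0 y (hEsub y hy')
              · intro y hy
                rcases List.mem_cons.mp hy with heq | hy'
                · omega
                · exact hrestL0 y hy'
              · exact hRS
              · exact hcsS
              · have hperm : List.Perm (x :: ((hl :: lt) ++ restL))
                    (L :: ((List.orderedInsert (· ≤ ·) x E) ++ (hl :: restL))) := by
                  have h1 : (hl :: lt) ++ restL = hl :: ((E ++ [L]) ++ restL) := by rw [hEL]; simp
                  rw [h1]
                  have h2 : (E ++ [L]) ++ restL = E ++ (L :: restL) := by simp
                  rw [h2]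
                  have h3 : List.Perm (E ++ (L :: restL)) (L :: (E ++ restL)) := List.perm_middle
                  refine (List.Perm.cons x (List.Perm.cons hl h3)).trans ?_
                  refine ((List.Perm.cons x (List.Perm.swap L hl _)).trans (List.Perm.swap L x _)).trans ?_
                  refine List.Perm.cons L ?_
                  refine (List.Perm.cons x List.perm_middle.symm).trans ?_
                  have h4 : x :: (E ++ (hl :: restL)) = (x :: E) ++ (hl :: restL) := by simp
                  rw [h4]
                  exact List.Perm.append_right _ (List.perm_orderedInsert _ x E).symm
                have hcons : (c ::ₘ (cs : Multiset Int)) = c ::ₘ ((((List.orderedInsert (· ≤ ·) x E) ++ (hl :: restL)) : List Int) : Multiset Int).map (fun y => -y) := by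
                  rw [hcsM, map_coe_perm hperm]
                  have hstep : (((L :: ((List.orderedInsert (· ≤ ·) x E) ++ (hl :: restL))) : List Int) : Multiset Int).map (fun y => -y)
                      = (-L) ::ₘ ((((List.orderedInsert (· ≤ ·) x E) ++ (hl :: restL)) : List Int) : Multiset Int).map (fun y => -y) := by
                    simp
                  rw [hstep]
                  have hcv : c = -L := by omega
                  rw [hcv]
                exact (Multiset.cons_inj_right c).mp hcons
              · intro y hy zz hzz
                rcases List.mem_cons.mp hy with heq | hy'
                · rcases List.mem_append.mp hzz with h' | h'
                  · rcases oi_mem h' with heq2 | h''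
                    · omega
                    · have := hhl_low zz (by simp [hEsub zz h''])
                      omega
                  · rcases List.mem_cons.mp h' with heq2 | h''
                    · have := hhl_low L hLmem
                      omega
                    · have := hlowhigh hl (by simp) zz h''
                      omega
                · rcases List.mem_append.mp hzz with h' | h'
                  · rcases oi_mem h' with heq2 | h''
                    · have := hrb y hy' hl (by simp)
                      omega
                    · exact hrb y hy' zz (List.mem_append_left _ (by simp [hEsub zz h'']))
                  · rcases List.mem_cons.mp h' with heq2 | h''
                    · have h5 := hrb y hy' L (List.mem_append_left _ hLmem)
                      omega
                    · exact hrb y hy' zz (List.mem_append_right _ h'')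
              · have hElen : E.length + 1 = lt.length := by
                  rw [← hEL]; simp
                rw [oi_len]
                simp only [List.length_cons] at hbk ⊢
                push_cast at hbk ⊢
                omega
              · intro hcon
                exfalso
                have hElen : E.length + 1 = lt.length := by
                  rw [← hEL]; simp
                rw [oi_len] at hcon
                simp only [List.length_cons] at hbk hcon
                push_cast at hbk hcon
                omega
              · have hsum : E.sum + L = lt.sum := by
                  rw [← hEL]; simp
                rw [oi_sum]
                simp only [List.sum_cons] at hnab ⊢
                omega
              · intro hh hhm
                simp at hhm
                omega
              · intro hneg
                exfalso
                omega
          · -- no deficit: A keeps going, goM fought hl and stays solvent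
            rw [if_neg hdef]
            have hxhigh : ∀ b ∈ high, x ≤ b := by
              intro b hb
              obtain ⟨h0, hs0, hhs⟩ := List.exists_cons_of_ne_nil (l := high) (by rintro rfl; simp at hb)
              have h1 : nA < h0 := by
                apply hhigh
                rw [hhs]; simp
              have h2 : h0 ≤ b := head_le_mem (hhs ▸ hhighS) b (hhs ▸ hb)
              omega
            have hRS : ((List.orderedInsert (· ≤ ·) x lt) ++ high).Pairwise (· ≤ ·) := by
              rw [List.pairwise_append]
              refine ⟨oi_sorted hltS x, hhighS, ?_⟩
              intro a ha b hb
              rcases oi_mem ha with heq | ha'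
              · have := hxhigh b hb; omega
              · exact hlowhigh a (by simp [ha']) b hb
            have hkept2 : List.orderedInsert (· ≤ ·) x (lt ++ high)
                = (List.orderedInsert (· ≤ ·) x lt) ++ high := by
              apply sorted_perm_eq ?_ (oi_sorted htailS x) hRS
              refine (List.perm_orderedInsert _ x _).trans ?_
              have h1 : x :: (lt ++ high) = (x :: lt) ++ high := by simp
              rw [h1]
              exact List.Perm.append_right _ (List.perm_orderedInsert _ x lt).symm
            rw [hkept2]
            apply ih (i+1) (nA - x) (nB - hl) (List.orderedInsert (· ≤ ·) x lt) high (hl :: restL) (List.orderedInsert (· ≤ ·) (-x) heapA) hrest'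
            · intro y hy
              rcases oi_mem hy with heq | hy'
              · omega
              · exact hlt0 y hy'
            · intro y hy
              rcases List.mem_cons.mp hy with heq | hy'
              · omega
              · exact hrestL0 y hy'
            · exact hRS
            · exact hheap1S
            · rw [hheap1M]
              refine map_coe_perm ?_
              have h1 : (hl :: lt) ++ restL = hl :: (lt ++ restL) := by simp
              rw [h1]
              refine (List.Perm.cons x List.perm_middle.symm).trans ?_
              have h2 : x :: (lt ++ (hl :: restL)) = (x :: lt) ++ (hl :: restL) := by simp
              rw [h2]
              exact List.Perm.append_right _ (List.perm_orderedInsert _ x lt).symm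
            · intro y hy zz hzz
              rcases List.mem_cons.mp hy with heq | hy'
              · rcases List.mem_append.mp hzz with h' | h'
                · rcases oi_mem h' with heq2 | h''
                  · omega
                  · have := hhl_low zz (by simp [h''])
                    omega
                · have := hlowhigh hl (by simp) zz h'
                  omega
              · rcases List.mem_append.mp hzz with h' | h'
                · rcases oi_mem h' with heq2 | h''
                  · have := hrb y hy' hl (by simp)
                    omega
                  · exact hrb y hy' zz (List.mem_append_left _ (by simp [h'']))
                · exact hrb y hy' zz (List.mem_append_right _ h')
            · rw [oi_len]
              simp only [List.length_cons] at hbk ⊢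
              push_cast at hbk ⊢
              omega
            · intro hcon
              exfalso
              rw [oi_len] at hcon
              simp only [List.length_cons] at hbk hcon
              push_cast at hbk hcon
              omega
            · rw [oi_sum]
              simp only [List.sum_cons] at hnab ⊢
              omega
            · intro hh hhm
              have := hhigh hh hhm
              omega
            · intro hneg; exact absurd hneg hdef

theorem coupled_nonpos (k : Int) (hk : ¬ 0 < k) :
    ∀ (rest : List Int) (i n : Int) (heapA : List Int),
    goA n k heapA i rest = goM n 0 [] i rest := by
  intro rest
  induction rest with
  | nil => intro i n heapA; simp [goA, goM]
  | cons x t ih =>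
    intro i n heapA
    simp only [goA, goM]
    have h1 : List.orderedInsert (· ≤ ·) x ([] : List Int) = [x] := rfl
    rw [h1]
    have hg : ((([x] : List Int).length : Int) > 0) := by simp
    rw [if_pos hg]
    simp only [List.headD, List.tail]
    by_cases hdef : n - x < 0
    · rw [if_pos hdef, if_neg (by omega : ¬ k > 0), if_pos hdef]
    · rw [if_neg hdef, if_neg hdef]
      exact ih (i + 1) (n - x) _

-- the BRIDGE: goM's running state (kept = the kk largest of the processed prefix, sorted;
-- F = the enemies it already fought; nB = n0 - F.sum) versus B's per-index feasibility test.
theorem bridge (n0 kk : Int) (hkk : 0 ≤ kk) (enemy : List Int) :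
    ∀ (suffix : List Int) (j : Nat) (kept F : List Int) (nB : Int),
    enemy.drop j = suffix →
    kept.Pairwise (· ≤ ·) →
    ((kept.length : Int) = min kk (j : Int)) →
    (enemy.take j).Perm (F ++ kept) →
    (∀ f ∈ F, ∀ z ∈ kept, f ≤ z) →
    nB = n0 - F.sum →
    goM nB kk kept (j : Int) suffix
      = goB n0 kk enemy (PySem.List.pyRange (max (j : Int) kk) (enemy.length : Int) 1) := by
  intro suffix
  induction suffix with
  | nil =>
    intro j kept F nB hdrop _ _ _ _ _
    have hj : enemy.length ≤ j := List.drop_eq_nil_iff.mp hdrop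
    rw [PySem.List.pyRange_one_eq_nil (by push_cast; omega)]
    simp [goM, goB]
  | cons x rest ih =>
    intro j kept F nB hdrop hks hklen hperm hcross hnb
    have hj : j < enemy.length := by
      by_contra h
      rw [List.drop_eq_nil_of_le (by omega)] at hdrop
      simp at hdrop
    have hdj : enemy.drop j = enemy[j] :: enemy.drop (j + 1) :=
      List.drop_eq_getElem_cons hj
    rw [hdrop] at hdj
    have hx : x = enemy[j] := (List.cons.injEq _ _ _ _ ▸ hdj).1
    have hrest : enemy.drop (j + 1) = rest := ((List.cons.injEq _ _ _ _ ▸ hdj).2).symm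
    have htake : enemy.take (j + 1) = enemy.take j ++ [x] := by
      rw [List.take_succ, List.getElem?_eq_getElem hj, hx]
      rfl
    have hFlen : F.length + kept.length = j := by
      have := hperm.length_eq
      simp [List.length_take, List.length_append] at this
      omega
    simp only [goM]
    have hk1len : (List.orderedInsert (· ≤ ·) x kept).length = kept.length + 1 := oi_len x kept
    have hk1perm : (List.orderedInsert (· ≤ ·) x kept).Perm (x :: kept) := List.perm_orderedInsert _ x kept
    have hk1s : (List.orderedInsert (· ≤ ·) x kept).Pairwise (· ≤ ·) := oi_sorted hks x
    have htakeperm : (enemy.take (j + 1)).Perm (F ++ List.orderedInsert (· ≤ ·) x kept) := by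
      rw [htake]
      refine (hperm.append_right [x]).trans ?_
      rw [List.append_assoc]
      exact List.Perm.append_left F (List.perm_append_comm.trans hk1perm.symm)
    by_cases hfull : ((List.orderedInsert (· ≤ ·) x kept).length : Int) > kk
    · -- phase 2: kept was full (kk ≤ j); goM pops its minimum, B tests index j
      have hjk : kk ≤ (j : Int) := by
        rw [hk1len] at hfull
        push_cast at hfull
        omega
      have hkl : (kept.length : Int) = kk := by omega
      rw [if_pos hfull]
      obtain ⟨c, cs, hc⟩ := List.exists_cons_of_ne_nil (oi_ne_nil x kept)
      rw [hc]
      simp only [List.headD, List.tail]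
      -- the range starts at j here, and j is its head
      have hmax : max ((j : Nat) : Int) kk = (j : Int) := by omega
      rw [hmax, PySem.List.pyRange_one_cons (by push_cast; omega)]
      simp only [goB]
      -- head of the sorted kept1 bounds everything in it
      have hcmin : ∀ y ∈ c :: cs, c ≤ y := head_le_mem (hc ▸ hk1s)
      have hcs_s : cs.Pairwise (· ≤ ·) := (List.pairwise_cons.mp (hc ▸ hk1s)).2
      have hcmem : c = x ∨ c ∈ kept := oi_mem (hc ▸ List.mem_cons_self ..)
      have hcsmem : ∀ b ∈ cs, b = x ∨ b ∈ kept := by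
        intro b hb
        exact oi_mem (hc ▸ List.mem_cons_of_mem c hb)
      -- the full cross bound: everything fought so far (F and c) ≤ everything still kept (cs)
      have hcross' : ∀ a ∈ F ++ [c], ∀ b ∈ cs, a ≤ b := by
        intro a ha b hb
        have hcb : c ≤ b := hcmin b (List.mem_cons_of_mem c hb)
        rcases List.mem_append.mp ha with haF | hac
        · rcases hcsmem b hb with hbx | hbk
          · -- b = x: either x ∈ kept (cross applies) or c ∈ kept (a ≤ c ≤ b)
            by_cases hxk : x ∈ kept
            · exact hbx ▸ hcross a haF x hxk
            · rcases hcmem with hcx | hck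
              · -- c = x but x ∉ kept: then x cannot also be in cs (count argument)
                exfalso
                have hcnt : (List.orderedInsert (· ≤ ·) x kept).count x = kept.count x + 1 := by
                  rw [hk1perm.count_eq]; simp
                rw [List.count_eq_zero_of_not_mem hxk, hc] at hcnt
                have hcnt2 : (c :: cs).count x = cs.count x + 1 := by
                  rw [List.count_cons]
                  simp [hcx]
                rw [hcnt2] at hcnt
                have : cs.count x = 0 := by omega
                exact (List.count_eq_zero.mp this) (hbx ▸ hb)
              · exact le_trans (hcross a haF c hck) hcb
          · exact hcross a haF b hbk
        · have : a = c := by simpa using hac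
          exact this ▸ hcb
      -- B's sorted prefix splits as (sorted of F ++ [c]) ++ cs
      have hSF := PySem.List.sorted_perm (xs := F ++ [c]) (key := fun x => x) (rev := false)
      have hSFs : (PySem.List.sorted (F ++ [c]) (fun x => x) false).Pairwise (· ≤ ·) := by
        have := PySem.List.sorted_pairwise (xs := F ++ [c]) (key := fun x => x)
        simpa using this
      have hpre : PySem.List.sorted (enemy.take (j + 1)) (fun x => x) false
          = PySem.List.sorted (F ++ [c]) (fun x => x) false ++ cs := by
        apply PySem.List.sorted_id_eq_of_perm_of_pairwise
        · refine (hSF.append_right cs).trans ?_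
          have he : (F ++ [c]) ++ cs = F ++ List.orderedInsert (· ≤ ·) x kept := by
            rw [hc]; simp
          rw [he]
          exact htakeperm.symm
        · rw [List.pairwise_append]
          refine ⟨hSFs, hcs_s, ?_⟩
          intro a ha b hb
          exact hcross' a ((PySem.List.mem_sorted _ _ _ _).mp ha) b hb
      -- the tested slice is exactly sorted (F ++ [c])
      have hslice1 : PySem.List.slice enemy none (some ((j : Int) + 1)) = enemy.take (j + 1) := by
        rw [PySem.List.slice_to enemy (by omega : (0:Int) ≤ (j : Int) + 1)]
        congr 1
      have hSFlen : (PySem.List.sorted (F ++ [c]) (fun x => x) false).length = F.length + 1 := by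
        rw [hSF.length_eq]; simp
      have hmustlen : ((j : Int) + 1 - kk).toNat = F.length + 1 := by omega
      have hslice2 : PySem.List.slice
          (PySem.List.sorted (F ++ [c]) (fun x => x) false ++ cs) none (some ((j : Int) + 1 - kk))
          = PySem.List.sorted (F ++ [c]) (fun x => x) false := by
        rw [PySem.List.slice_to _ (by omega : (0:Int) ≤ (j : Int) + 1 - kk), hmustlen]
        exact List.take_left' hSFlen
      have hsum : (PySem.List.sorted (F ++ [c]) (fun x => x) false).sum = F.sum + c := by
        rw [hSF.sum_eq]; simp
      rw [hslice1, hpre, hslice2, hsum]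
      by_cases hdef : nB - c < 0
      · rw [if_pos hdef, if_pos (by omega : F.sum + c > n0)]
      · rw [if_neg hdef, if_neg (by omega : ¬ F.sum + c > n0)]
        have hcl : cs.length + 1 = kept.length + 1 := by
          have h := hk1len
          rw [hc] at h
          simpa using h
        have hIH := ih (j + 1) cs (F ++ [c]) (nB - c) hrest hcs_s
          (by push_cast; omega)
          (by
            refine htakeperm.trans ?_
            have he : F ++ List.orderedInsert (· ≤ ·) x kept = (F ++ [c]) ++ cs := by
              rw [hc]; simp
            rw [he])
          hcross'
          (by rw [hnb]; simp; ring)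
        rw [show max (((j + 1 : Nat)) : Int) kk = (((j + 1 : Nat)) : Int) from by push_cast; omega] at hIH
        have hstep : ((j : Nat) : Int) + 1 = (((j + 1 : Nat)) : Int) := by push_cast; ring
        rw [hstep]
        exact hIH
    · -- phase 1: kept not yet full (j < kk); goM just keeps x, B's range is untouched
      rw [if_neg hfull]
      have hjk : (j : Int) < kk := by
        rw [hk1len] at hfull
        push_cast at hfull
        omega
      have hklj : (kept.length : Int) = (j : Int) := by omega
      have hF0 : F = [] := by
        have : F.length = 0 := by omega
        exact List.eq_nil_of_length_eq_zero this
      subst hF0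
      have hmax1 : max ((j : Nat) : Int) kk = kk := by omega
      have hIH := ih (j + 1) (List.orderedInsert (· ≤ ·) x kept) [] nB hrest hk1s
        (by rw [hk1len]; push_cast; omega)
        (by simpa using htakeperm)
        (by intro f hf; simp at hf)
        (by simpa using hnb)
      rw [show max (((j + 1 : Nat)) : Int) kk = kk from by push_cast; omega] at hIH
      have hstep : ((j : Nat) : Int) + 1 = (((j + 1 : Nat)) : Int) := by push_cast; ring
      rw [hmax1, hstep]
      exact hIH

-- ===== VERDICT (by name: the statement is the Claim_ definition above) =====
theorem solution_spec : Claim_equal_solution := by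
  unfold Claim_equal_solution Spec_solution Pre_solution
  intro n k enemy _ hpre
  unfold solution solution_alt
  by_cases hke : k ≥ (enemy.length : Int)
  · rw [if_pos hke, if_pos hke]
  · rw [if_neg hke, if_neg hke]
    have hbridge0 : ∀ kk : Int, 0 ≤ kk →
        goM n kk [] 0 enemy = goB n kk enemy (PySem.List.pyRange kk (enemy.length : Int) 1) := by
      intro kk hkk
      have h := bridge n kk hkk enemy enemy 0 [] [] n (by simp) (by simp)
        (by simp; omega) (by simp) (by simp) (by simp)
      rw [show max (((0 : Nat)) : Int) kk = kk from by push_cast; omega] at h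
      simpa using h
    have hgo : goA n k [] 0 enemy = goB n (max k 0) enemy (PySem.List.pyRange (max k 0) (enemy.length : Int) 1) := by
      by_cases hk : 0 < k
      · have hmk : max k 0 = k := by omega
        rw [hmk]
        have h1 : goA n k [] 0 enemy = goM n k [] 0 enemy := by
          have := coupled k hk enemy 0 n n [] [] [] []
            hpre (by simp) (by simp) (by simp) (by simp) (by simp)
            (by simp) (by simpa using le_of_lt hk) (by intro h; rfl) (by simp)
            (by simp) (fun h => ⟨rfl, rfl⟩)
          simpa using this
        rw [h1]
        exact hbridge0 k (le_of_lt hk)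
      · have hmk : max k 0 = 0 := by omega
        rw [hmk]
        rw [coupled_nonpos k hk enemy 0 n []]
        exact hbridge0 0 le_rfl
    rw [hgo]
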